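-- pv_equiv track=rewrite | github.com/Vangmay/LA-Hacks | backend/core/span_resolver.py | _approximate_raw_position
-- ===== SOURCE A (Python) =====
-- def _approximate_raw_position(raw: str, normalized_pos: int, span_len: int) -> int:
--     """Map an offset in the whitespace-collapsed text back to raw_text."""
--     consumed = 0
--     raw_pos = 0
--     while raw_pos < len(raw) and consumed < normalized_pos:
--         if raw[raw_pos] in " \t\r\n\f\v":
--             # collapse runs of whitespace into one consumed char
--             raw_pos += 1
--             while raw_pos < len(raw) and raw[raw_pos] in " \t\r\n\f\v":
--                 raw_pos += 1
--             consumed += 1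
--         else:
--             raw_pos += 1
--             consumed += 1
--     return min(len(raw) - span_len if span_len > 0 else len(raw), raw_pos)
-- ===== SOURCE B (Python) =====
-- from itertools import groupby
--
-- _WS = " \t\r\n\f\v"
--
-- def _approximate_raw_position(raw: str, normalized_pos: int, span_len: int) -> int:
--     """Map an offset in the whitespace-collapsed text back to raw_text.
--
--     Partition raw into maximal runs (groupby on whitespace-ness), then walk
--     the runs: a whitespace run costs 1 normalized char, a word run is taken
--     partially up to the remaining budget.
--     """
--     consumed = 0
--     raw_pos = 0
--     for is_ws, grp in groupby(raw, key=lambda c: c in _WS):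
--         if consumed >= normalized_pos:
--             break
--         n = sum(1 for _ in grp)
--         if is_ws:
--             consumed += 1
--             raw_pos += n
--         else:
--             take = min(n, normalized_pos - consumed)
--             consumed += take
--             raw_pos += take
--     cap = len(raw) - span_len if span_len > 0 else len(raw)
--     return min(cap, raw_pos)
-- ===== Notes on version B (the rewrite author's own statement) =====
-- stated objective: alternative
-- what changed: Replaced A's char-by-char while loop with nested run-skipping by a run-level walk: raw is first partitioned into maximal whitespace/word runs with itertools.groupby, then each run is consumed wholesale (a whitespace run costs 1 normalized char, a word run is taken up to the remaining budget via min).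
import Mathlib
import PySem

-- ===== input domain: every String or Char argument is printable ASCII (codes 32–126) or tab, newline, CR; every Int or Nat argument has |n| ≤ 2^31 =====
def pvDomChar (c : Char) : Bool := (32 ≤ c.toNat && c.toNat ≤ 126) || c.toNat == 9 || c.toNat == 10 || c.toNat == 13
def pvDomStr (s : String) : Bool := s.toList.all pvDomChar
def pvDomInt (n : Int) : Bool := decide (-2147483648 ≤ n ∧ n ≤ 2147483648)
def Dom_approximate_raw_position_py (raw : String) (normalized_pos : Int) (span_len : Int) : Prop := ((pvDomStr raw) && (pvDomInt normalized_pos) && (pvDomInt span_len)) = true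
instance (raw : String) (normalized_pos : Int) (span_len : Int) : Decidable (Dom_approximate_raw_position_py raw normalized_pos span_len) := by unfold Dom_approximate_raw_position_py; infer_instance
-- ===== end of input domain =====

-- B re-decomposes A's char-by-char collapse scan into a walk over maximal
-- whitespace/word runs (groupby); same value everywhere, same O(n) cost.

-- c in " \t\r\n\f\v"
def pvIsWS (c : Char) : Bool :=
  c = ' ' || c = '\t' || c = '\r' || c = '\n' || c = '\x0c' || c = '\x0b'

-- ===== PORT A =====
-- inner `while raw_pos < len(raw) and raw[raw_pos] in WS: raw_pos += 1`
def pvSkipWS : List Char → Int → List Char × Int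
  | [], p => ([], p)
  | c :: cs, p => if pvIsWS c then pvSkipWS cs (p + 1) else (c :: cs, p)

theorem pvSkipWS_len_le : ∀ (cs : List Char) (p : Int), (pvSkipWS cs p).1.length ≤ cs.length := by
  intro cs
  induction cs with
  | nil => intro p; simp [pvSkipWS]
  | cons c cs ih =>
    intro p
    simp only [pvSkipWS]
    split
    · exact le_trans (ih (p + 1)) (Nat.le_succ _)
    · exact le_refl _

-- the outer while loop of A, over the remaining characters
def pvLoopA : List Char → Int → Int → Int → Int
  | [], _, pos, _ => pos
  | c :: cs, consumed, pos, np =>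
    if consumed < np then
      if pvIsWS c then
        let pr := pvSkipWS cs (pos + 1)
        pvLoopA pr.1 (consumed + 1) pr.2 np
      else
        pvLoopA cs (consumed + 1) (pos + 1) np
    else pos
termination_by cs _ _ _ => cs.length
decreasing_by
  · exact Nat.lt_succ_of_le (pvSkipWS_len_le cs (pos + 1))
  · exact Nat.lt_succ_of_le (le_refl _)

def approximate_raw_position_py (raw : String) (normalized_pos : Int) (span_len : Int) : Int :=
  let rp := pvLoopA raw.toList 0 0 normalized_pos
  min (if span_len > 0 then (raw.toList.length : Int) - span_len else (raw.toList.length : Int)) rp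

-- ===== PORT B =====
-- longest prefix of cs whose chars have whitespace-key k, and the rest
def pvSpanKey (k : Bool) : List Char → List Char × List Char
  | [] => ([], [])
  | c :: cs =>
    if pvIsWS c = k then
      let pr := pvSpanKey k cs
      (c :: pr.1, pr.2)
    else ([], c :: cs)

theorem pvSpanKey_len_le : ∀ (k : Bool) (cs : List Char), (pvSpanKey k cs).2.length ≤ cs.length := by
  intro k cs
  induction cs with
  | nil => simp [pvSpanKey]
  | cons c cs ih =>
    simp only [pvSpanKey]
    split
    · exact le_trans ih (Nat.le_succ _)
    · exact le_refl _

-- itertools.groupby(raw, key = is-whitespace), each group replaced by (key, length)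
def pvGroups : List Char → List (Bool × Int)
  | [] => []
  | c :: cs =>
    let k := pvIsWS c
    let pr := pvSpanKey k cs
    (k, 1 + (pr.1.length : Int)) :: pvGroups pr.2
termination_by cs => cs.length
decreasing_by
  exact Nat.lt_succ_of_le (pvSpanKey_len_le _ cs)

-- the for loop of B over the runs
def pvLoopB : List (Bool × Int) → Int → Int → Int → Int
  | [], _, pos, _ => pos
  | (k, n) :: gs, consumed, pos, np =>
    if consumed ≥ np then pos
    else if k then pvLoopB gs (consumed + 1) (pos + n) np
    else
      let take := min n (np - consumed)
      pvLoopB gs (consumed + take) (pos + take) np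

def approximate_raw_position_py_alt (raw : String) (normalized_pos : Int) (span_len : Int) : Int :=
  let rp := pvLoopB (pvGroups raw.toList) 0 0 normalized_pos
  let cap := if span_len > 0 then (raw.toList.length : Int) - span_len else (raw.toList.length : Int)
  min cap rp

-- ===== PRECONDITION & SPEC =====
def Spec_approximate_raw_position_py (raw : String) (normalized_pos : Int) (span_len : Int) (out : Int) : Prop := out = approximate_raw_position_py_alt raw normalized_pos span_len
instance (raw : String) (normalized_pos : Int) (span_len : Int) (out : Int) : Decidable (Spec_approximate_raw_position_py raw normalized_pos span_len out) := by unfold Spec_approximate_raw_position_py; infer_instance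

-- ===== CLAIM (what is proved, stated in full; the proofs are below) =====
def Claim_equal_approximate_raw_position_py : Prop := ∀ (raw : String) (normalized_pos : Int) (span_len : Int), Dom_approximate_raw_position_py raw normalized_pos span_len → Spec_approximate_raw_position_py raw normalized_pos span_len (approximate_raw_position_py raw normalized_pos span_len)

-- ===== LEMMAS AND PROOFS =====

theorem pvLoopA_stop (cs : List Char) (consumed pos np : Int) (h : ¬ consumed < np) :
    pvLoopA cs consumed pos np = pos := by
  cases cs with
  | nil => simp [pvLoopA]
  | cons c cs => simp [pvLoopA, h]

theorem pvSpanKey_decomp (k : Bool) (cs : List Char) :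
    (pvSpanKey k cs).1 ++ (pvSpanKey k cs).2 = cs := by
  induction cs with
  | nil => simp [pvSpanKey]
  | cons c cs ih =>
    simp only [pvSpanKey]
    split
    · simpa using ih
    · simp

theorem pvSpanKey_all (k : Bool) (cs : List Char) :
    ∀ c ∈ (pvSpanKey k cs).1, pvIsWS c = k := by
  induction cs with
  | nil => simp [pvSpanKey]
  | cons c cs ih =>
    simp only [pvSpanKey]
    split
    · rename_i h
      intro d hd
      simp only [List.mem_cons] at hd
      rcases hd with rfl | hd
      · exact h
      · exact ih d hd
    · simp

theorem pvSpanKey_rest (k : Bool) (cs : List Char) :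
    ∀ d ds, (pvSpanKey k cs).2 = d :: ds → pvIsWS d ≠ k := by
  induction cs with
  | nil => simp [pvSpanKey]
  | cons c cs ih =>
    simp only [pvSpanKey]
    split
    · exact ih
    · rename_i h
      intro d ds hd
      cases hd
      exact h

-- skipping a maximal whitespace run
theorem pvSkipWS_run (t : List Char) (r : List Char) (p : Int)
    (ht : ∀ c ∈ t, pvIsWS c = true)
    (hr : ∀ d ds, r = d :: ds → pvIsWS d ≠ true) :
    pvSkipWS (t ++ r) p = (r, p + (t.length : Int)) := by
  induction t generalizing p with
  | nil =>
    cases r with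
    | nil => simp [pvSkipWS]
    | cons d ds =>
      have : pvIsWS d = false := by
        have := hr d ds rfl
        simpa using this
      simp [pvSkipWS, this]
  | cons c t ih =>
    have hc : pvIsWS c = true := ht c (List.mem_cons_self ..)
    simp only [List.cons_append, pvSkipWS, hc, if_pos]
    rw [ih (p + 1) (fun c hc => ht c (List.mem_cons_of_mem _ hc))]
    simp only [List.length_cons, Prod.mk.injEq, true_and]
    push_cast
    ring

-- stepping A through a run of non-whitespace characters
theorem pvLoopA_word_run (t : List Char) (r : List Char) (consumed pos np : Int)
    (ht : ∀ c ∈ t, pvIsWS c = false) :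
    pvLoopA (t ++ r) consumed pos np =
      pvLoopA r (consumed + max 0 (min (t.length : Int) (np - consumed)))
               (pos + max 0 (min (t.length : Int) (np - consumed))) np := by
  induction t generalizing consumed pos with
  | nil =>
    simp
  | cons c t ih =>
    by_cases h : consumed < np
    · have hc : pvIsWS c = false := ht c (List.mem_cons_self ..)
      have hmax : max 0 (min ((c :: t).length : Int) (np - consumed))
          = 1 + max 0 (min (t.length : Int) (np - (consumed + 1))) := by
        simp only [List.length_cons]
        push_cast
        by_cases hle : (np - consumed) ≤ (t.length : Int) + 1
        · rw [min_eq_right hle, min_eq_right (by omega)]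
          omega
        · rw [min_eq_left (by omega), min_eq_left (by omega)]
          omega
      simp only [List.cons_append, pvLoopA, h, if_pos, hc, Bool.false_eq_true, if_false]
      rw [ih (consumed + 1) (pos + 1) (fun c hc => ht c (List.mem_cons_of_mem _ hc)), hmax]
      ring_nf
    · have hmax : max 0 (min (((c :: t).length : Int)) (np - consumed)) = 0 := by
        have : np - consumed ≤ 0 := by omega
        rw [max_eq_left]
        exact le_trans (min_le_right _ _) this
      rw [hmax]
      simp only [add_zero]
      rw [pvLoopA_stop _ _ _ _ h, pvLoopA_stop _ _ _ _ h]

-- main loop correspondence: A over characters = B over the groups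
theorem pvLoopA_eq_loopB : ∀ (N : Nat) (cs : List Char), cs.length ≤ N →
    ∀ consumed pos np, pvLoopA cs consumed pos np = pvLoopB (pvGroups cs) consumed pos np := by
  intro N
  induction N with
  | zero =>
    intro cs hcs consumed pos np
    have : cs = [] := List.eq_nil_of_length_eq_zero (Nat.le_zero.mp hcs)
    subst this
    simp [pvLoopA, pvGroups, pvLoopB]
  | succ N ih =>
    intro cs hcs consumed pos np
    cases cs with
    | nil => simp [pvLoopA, pvGroups, pvLoopB]
    | cons c cs =>
      by_cases h : consumed < np
      · by_cases hws : pvIsWS c = true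
        · -- whitespace run
          have hdec := pvSpanKey_decomp true cs
          have hall := pvSpanKey_all true cs
          have hrest := pvSpanKey_rest true cs
          simp only [pvLoopA, h, if_pos, hws, if_pos]
          conv_lhs => rw [show cs = (pvSpanKey true cs).1 ++ (pvSpanKey true cs).2 from hdec.symm]
          rw [pvSkipWS_run _ _ _ hall hrest]
          rw [pvGroups]
          simp only [hws]
          rw [pvLoopB]
          rw [if_neg (by omega), if_pos rfl]
          have hlen : (pvSpanKey true cs).2.length ≤ N := by
            have := pvSpanKey_len_le true cs
            simp only [List.length_cons] at hcs
            omega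
          rw [ih _ hlen]
          congr 1
          ring
        · -- word run
          have hws' : pvIsWS c = false := by simpa using hws
          have hdec := pvSpanKey_decomp false cs
          have hall := pvSpanKey_all false cs
          simp only [pvLoopA, h, if_pos, hws', Bool.false_eq_true, if_false]
          conv_lhs => rw [show cs = (pvSpanKey false cs).1 ++ (pvSpanKey false cs).2 from hdec.symm]
          rw [pvLoopA_word_run _ _ _ _ _ hall]
          rw [pvGroups]
          simp only [hws']
          rw [pvLoopB]
          rw [if_neg (by omega)]
          simp only [Bool.false_eq_true, if_false]
          have hlen : (pvSpanKey false cs).2.length ≤ N := by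
            have := pvSpanKey_len_le false cs
            simp only [List.length_cons] at hcs
            omega
          rw [ih _ hlen]
          -- arithmetic: 1 + partial run consumption = B's take over the whole group
          have htake : (1 : Int) + max 0 (min ((pvSpanKey false cs).1.length : Int) (np - (consumed + 1)))
              = min (1 + ((pvSpanKey false cs).1.length : Int)) (np - consumed) := by
            set L : Int := ((pvSpanKey false cs).1.length : Int) with hL
            have hL0 : 0 ≤ L := by positivity
            by_cases hle : (np - (consumed + 1)) ≤ L
            · rw [min_eq_right hle, min_eq_right (by omega)]
              omega
            · rw [min_eq_left (by omega), min_eq_left (by omega)]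
              omega
          rw [show consumed + 1 + max 0 (min ((pvSpanKey false cs).1.length : Int) (np - (consumed + 1)))
              = consumed + (1 + max 0 (min ((pvSpanKey false cs).1.length : Int) (np - (consumed + 1)))) by ring,
              show pos + 1 + max 0 (min ((pvSpanKey false cs).1.length : Int) (np - (consumed + 1)))
              = pos + (1 + max 0 (min ((pvSpanKey false cs).1.length : Int) (np - (consumed + 1)))) by ring,
              htake]
      · rw [pvLoopA_stop _ _ _ _ h, pvGroups, pvLoopB, if_pos (by omega)]

-- ===== VERDICT (by name: the statement is the Claim_ definition above) =====
theorem approximate_raw_position_py_spec : Claim_equal_approximate_raw_position_py := by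
  intro raw np sl _
  unfold Spec_approximate_raw_position_py approximate_raw_position_py approximate_raw_position_py_alt
  rw [pvLoopA_eq_loopB raw.toList.length raw.toList (le_refl _)]
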